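-- pv_equiv track=rewrite | github.com/licinta/Last1Month | 动态规划/Mondarian's Dream.py | brk
-- ===== SOURCE A (Python) =====
-- def brk(temp):
--     f = False
--     l,r=0,0
--     while l<len(temp):
--         if temp[l]=='0':
--             r=l
--             while r<len(temp) and temp[r]=='0':
--                 r+=1
--             count=r-l
--             if count%2==1:
--                 f=True
--                 break
--             else :
--                 l=r
--         else:
--             l+=1
--
--     return f
-- ===== SOURCE B (Python) =====
-- def brk(temp):
--     # single pass run-length tracking: (prev char, current run length), flush on change
--     prev = None
--     count = 0
--     found = False
--     for ch in temp:
--         if prev == ch: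
--             count += 1
--         else:
--             found = found or (prev == '0' and count % 2 == 1)
--             prev, count = ch, 1
--     return found or (prev == '0' and count % 2 == 1)
-- ===== Notes on version B (the rewrite author's own statement) =====
-- stated objective: alternative
-- what changed: Replaced the two-pointer index walk with nested run-extension loop and early break by a single pass over the characters keeping only (previous char, current run length, found) and flushing the parity test at each run boundary; no indices, no nested loop.
import Mathlib
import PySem

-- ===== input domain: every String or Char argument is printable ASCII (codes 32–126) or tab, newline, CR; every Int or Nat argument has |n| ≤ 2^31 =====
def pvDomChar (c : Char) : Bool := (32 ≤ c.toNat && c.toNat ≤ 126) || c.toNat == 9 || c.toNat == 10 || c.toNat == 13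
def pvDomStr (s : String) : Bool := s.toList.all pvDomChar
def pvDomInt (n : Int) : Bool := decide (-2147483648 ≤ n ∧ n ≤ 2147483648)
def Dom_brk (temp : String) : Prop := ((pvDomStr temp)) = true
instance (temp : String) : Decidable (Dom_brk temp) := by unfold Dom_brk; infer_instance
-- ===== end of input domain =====

-- B replaces A's two-pointer index walk (with a nested run-extension loop and early
-- break) by one pass that tracks only (previous char, current run length, found) and
-- tests run parity at each boundary; same O(n) cost, different structure.

-- ===== PORT A =====
-- A's outer while over l: on a '0' the inner while advances r through the run
-- (count = r - l = 1 + zeros after l), odd count breaks with True, even jumps l to r;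
-- a non-'0' advances l by one. Ported as recursion on the suffix starting at l.
def brkA : List Char → Bool
  | [] => false
  | c :: rest =>
    if c = '0' then
      -- inner while: run length from position l
      if (1 + (rest.takeWhile (· == '0')).length) % 2 = 1 then true
      else brkA (rest.dropWhile (· == '0'))
    else brkA rest
termination_by l => l.length
decreasing_by
  · simpa using Nat.lt_succ_of_le (List.length_dropWhile_le _ _)
  · simp

def brk (temp : String) : Bool := brkA temp.toList

-- ===== PORT B =====
-- one loop iteration of Source B: extend the current run or flush its parity and restart
def brkAltStep (st : Option Char × Nat × Bool) (ch : Char) : Option Char × Nat × Bool :=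
  if st.1 = some ch then (st.1, st.2.1 + 1, st.2.2)
  else (some ch, 1, st.2.2 || (decide (st.1 = some '0') && decide (st.2.1 % 2 = 1)))

-- Source B's final 'return found or (prev == '0' and count % 2 == 1)'
def brkAltFinish (st : Option Char × Nat × Bool) : Bool :=
  st.2.2 || (decide (st.1 = some '0') && decide (st.2.1 % 2 = 1))

def brk_alt (temp : String) : Bool :=
  brkAltFinish (temp.toList.foldl brkAltStep (none, 0, false))

-- ===== PRECONDITION & SPEC =====
def Spec_brk (temp : String) (out : Bool) : Prop := out = brk_alt temp
instance (temp : String) (out : Bool) : Decidable (Spec_brk temp out) := by unfold Spec_brk; infer_instance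

-- ===== CLAIM (what is proved, stated in full; the proofs are below) =====
def Claim_equal_brk : Prop := ∀ (temp : String), Dom_brk temp → Spec_brk temp (brk temp)

-- ===== LEMMAS AND PROOFS =====

-- finishing B's fold from state st on the remaining characters l
def gAlt (l : List Char) (st : Option Char × Nat × Bool) : Bool :=
  brkAltFinish (l.foldl brkAltStep st)

theorem gAlt_nil (st : Option Char × Nat × Bool) : gAlt [] st = brkAltFinish st := rfl

theorem gAlt_cons (x : Char) (xs : List Char) (st : Option Char × Nat × Bool) :
    gAlt (x :: xs) st = gAlt xs (brkAltStep st x) := rfl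

-- the found flag only ORs through the rest of the fold
theorem gAlt_or (l : List Char) :
    ∀ (p : Option Char) (k : Nat) (f : Bool), gAlt l (p, k, f) = (f || gAlt l (p, k, false)) := by
  induction l with
  | nil => intro p k f; simp [gAlt_nil, brkAltFinish]
  | cons x xs ih =>
    intro p k f
    by_cases hx : p = some x
    · have h1 : brkAltStep (p, k, f) x = (p, k + 1, f) := by simp [brkAltStep, hx]
      have h2 : brkAltStep (p, k, false) x = (p, k + 1, false) := by simp [brkAltStep, hx]
      rw [gAlt_cons, gAlt_cons, h1, h2, ih]
    · have h1 : brkAltStep (p, k, f) x =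
          (some x, 1, f || (decide (p = some '0') && decide (k % 2 = 1))) := by
        simp [brkAltStep, hx]
      have h2 : brkAltStep (p, k, false) x =
          (some x, 1, decide (p = some '0') && decide (k % 2 = 1)) := by
        simp [brkAltStep, hx]
      rw [gAlt_cons, gAlt_cons, h1, h2, ih _ _ (f || _), ih _ _ (_ && _)]
      simp [Bool.or_assoc]

-- running B's fold from inside a run of c: the run is finished (takeWhile), its
-- parity flushed, and the rest restarts from the empty state
theorem gAlt_run (l : List Char) :
    ∀ (c : Char) (k : Nat) (f : Bool),
      gAlt l (some c, k, f) =
        (f || ((decide (c = '0') && decide ((k + (l.takeWhile (· == c)).length) % 2 = 1))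
            || gAlt (l.dropWhile (· == c)) (none, 0, false))) := by
  induction l with
  | nil =>
    intro c k f
    simp [gAlt_nil, brkAltFinish]
  | cons x xs ih =>
    intro c k f
    by_cases hx : x = c
    · subst hx
      have hstep : brkAltStep (some x, k, f) x = (some x, k + 1, f) := by
        simp [brkAltStep]
      rw [gAlt_cons, hstep, ih]
      simp [Nat.add_comm, Nat.add_assoc]
    · have hne : (some c : Option Char) ≠ some x := by simpa using fun h => hx h.symm
      have hstep : brkAltStep (some c, k, f) x =
          (some x, 1, f || (decide (c = '0') && decide (k % 2 = 1))) := by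
        simp [brkAltStep, hne]
      have hbx : (x == c) = false := by simpa using hx
      rw [gAlt_cons, hstep, gAlt_or xs]
      simp only [List.takeWhile, List.dropWhile, hbx, List.length_nil, Nat.add_zero]
      rw [show gAlt (x :: xs) (none, 0, false) = gAlt xs (some x, 1, false) by
            simp [gAlt_cons, brkAltStep]]
      simp [Bool.or_assoc]

-- A advances one char at a time through a non-'0' run; dropping that run is the same
theorem brkA_drop_non0 (c : Char) (hc : ¬ c = '0') :
    ∀ l : List Char, brkA (l.dropWhile (· == c)) = brkA l := by
  intro l
  induction l with
  | nil => simp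
  | cons x xs ih =>
    by_cases hx : x = c
    · subst hx
      have hbx : (x == x) = true := by simp
      rw [List.dropWhile_cons_of_pos (by simp)]
      rw [ih, show brkA (x :: xs) = brkA xs by rw [brkA]; simp [hc]]
    · rw [List.dropWhile_cons_of_neg (by simpa using hx)]

theorem gAlt_eq_brkA : ∀ (n : Nat) (l : List Char), l.length ≤ n →
    gAlt l (none, 0, false) = brkA l := by
  intro n
  induction n with
  | zero =>
    intro l hl
    have : l = [] := List.length_eq_zero_iff.mp (Nat.le_zero.mp hl)
    subst this; simp [gAlt, brkAltFinish, brkA]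
  | succ n ih =>
    intro l hl
    match l with
    | [] => simp [gAlt, brkAltFinish, brkA]
    | c :: rest =>
      have h1 : gAlt (c :: rest) (none, 0, false) = gAlt rest (some c, 1, false) := by
        simp [gAlt_cons, brkAltStep]
      rw [h1, gAlt_run]
      have hdrop : (rest.dropWhile (· == c)).length ≤ n := by
        have := List.length_dropWhile_le (· == c) rest
        have hr : rest.length ≤ n := by simpa using Nat.succ_le_succ_iff.mp hl
        omega
      rw [ih _ hdrop]
      by_cases hc : c = '0'
      · subst hc
        rw [brkA]
        simp only [decide_true, Bool.true_and, Bool.false_or]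
        by_cases hodd : (1 + (rest.takeWhile (· == '0')).length) % 2 = 1
        · simp [hodd]
        · simp [hodd]
      · rw [show brkA (c :: rest) = brkA rest by rw [brkA]; simp [hc]]
        rw [brkA_drop_non0 c hc rest]
        simp [hc]

-- ===== VERDICT (by name: the statement is the Claim_ definition above) =====
theorem brk_spec : Claim_equal_brk := by
  intro temp _
  unfold Spec_brk brk brk_alt
  exact (gAlt_eq_brkA temp.toList.length temp.toList (le_refl _)).symm
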